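-- pv_equiv track=rewrite | github.com/lukaselmer/adventofcode | 2018/aoc/d11/main.py | _sum_vertical_line
-- ===== SOURCE A (Python) =====
-- from typing import Any, Dict, List, Tuple
--
-- def _sum_vertical_line(
--     cache: Dict[Any, int], matrix: List[List[int]], position: Tuple[int, int], size: int
-- ):
--     if size == 1:
--         return matrix[position[0]][position[1]]
--
--     cache_key = (-2, position[0], position[1], size)
--     if not cache_key in cache:
--         cache[cache_key] = (
--             _sum_vertical_line(cache, matrix, position, size - 1)
--             + matrix[position[0] + size - 1][position[1]]
--         )
--
--     return cache[cache_key]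
-- ===== SOURCE B (Python) =====
-- def _sum_vertical_line(cache, matrix, position, size):
--     if size == 1:
--         return matrix[position[0]][position[1]]
--     r, c = position
--     # find the nearest already-cached size (or fall through to s == 1)
--     s = size
--     while s > 1 and (-2, r, c, s) not in cache:
--         s -= 1
--     total = matrix[r][c] if s == 1 else cache[(-2, r, c, s)]
--     # accumulate upward, writing the same cache entries A's recursion would
--     for t in range(s + 1, size + 1):
--         total += matrix[r + t - 1][c]
--         cache[(-2, r, c, t)] = total
--     return total
-- ===== Notes on version B (the rewrite author's own statement) =====
-- stated objective: alternative
-- what changed: Replaces the memoized recursion by an iterative scan downward to the nearest cached size followed by a bottom-up accumulation loop (no recursion, same cache writes).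
-- outside the precondition, e.g. on _sum_vertical_line({(-2, 0, 0, 2): 7}, [], (0, 0), 2): A returns 7, B returns 7
import Mathlib
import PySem

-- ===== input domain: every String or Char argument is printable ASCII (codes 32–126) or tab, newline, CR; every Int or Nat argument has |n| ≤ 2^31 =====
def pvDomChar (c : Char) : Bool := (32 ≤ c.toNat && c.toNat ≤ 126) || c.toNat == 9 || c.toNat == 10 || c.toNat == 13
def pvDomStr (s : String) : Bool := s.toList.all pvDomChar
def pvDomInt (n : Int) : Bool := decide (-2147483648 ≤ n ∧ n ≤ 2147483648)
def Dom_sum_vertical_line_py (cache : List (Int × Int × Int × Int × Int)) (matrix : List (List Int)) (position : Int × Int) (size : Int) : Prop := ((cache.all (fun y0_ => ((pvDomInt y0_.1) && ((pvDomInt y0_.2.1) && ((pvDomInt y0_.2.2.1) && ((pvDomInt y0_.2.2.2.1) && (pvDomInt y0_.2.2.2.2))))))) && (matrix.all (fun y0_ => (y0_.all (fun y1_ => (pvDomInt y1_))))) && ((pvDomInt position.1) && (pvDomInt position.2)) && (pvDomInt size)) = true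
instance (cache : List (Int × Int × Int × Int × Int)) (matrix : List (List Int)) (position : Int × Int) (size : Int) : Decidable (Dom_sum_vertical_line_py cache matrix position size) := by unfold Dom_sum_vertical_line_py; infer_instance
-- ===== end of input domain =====

-- B replaces A's memoized recursion by an iterative downward scan to the nearest cached size
-- plus a bottom-up accumulation loop (objective: alternative — no recursion, same cost).
-- Both Pythons also write the same cache entries in the same order; the theorems here are
-- about the RETURN value only (the cache argument is read-only in the ports).

-- ===== PORT A =====
-- lookup of key (-2, r, c, s) in the cache dict (first match in the association list)
def pvLookup (cache : List (Int × Int × Int × Int × Int)) (r c s : Int) : Option Int :=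
  match cache with
  | [] => none
  | (a, b, d, e, v) :: t =>
    if a = -2 ∧ b = r ∧ d = c ∧ e = s then some v else pvLookup t r c s

-- matrix[i][c]; total form of the double indexing (Pre_ keeps both indexes in Python range)
def pvMget (matrix : List (List Int)) (i c : Int) : Int :=
  (PySem.List.pyGet? ((PySem.List.pyGet? matrix i).getD []) c).getD 0

-- A's recursion, fuelled by size.toNat (Python diverges for size ≤ 0 without a cache hit; Pre_ excludes that)
def pvARec (cache : List (Int × Int × Int × Int × Int)) (matrix : List (List Int)) (r c : Int) : Nat → Int → Int
  | fuel, size =>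
    if size = 1 then pvMget matrix r c
    else
      match pvLookup cache r c size with
      | some v => v
      | none =>
        match fuel with
        | 0 => 0
        | n + 1 => pvARec cache matrix r c n (size - 1) + pvMget matrix (r + size - 1) c

def sum_vertical_line_py (cache : List (Int × Int × Int × Int × Int)) (matrix : List (List Int)) (position : Int × Int) (size : Int) : Int :=
  pvARec cache matrix position.1 position.2 size.toNat size

-- ===== PORT B =====
-- the while loop: scan s downward while s > 1 and (-2,r,c,s) is not cached
def pvScanDown (cache : List (Int × Int × Int × Int × Int)) (r c : Int) : Nat → Int → Int
  | fuel, s =>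
    if 1 < s then
      match pvLookup cache r c s with
      | some _ => s
      | none =>
        match fuel with
        | 0 => s
        | n + 1 => pvScanDown cache r c n (s - 1)
    else s

def sum_vertical_line_py_alt (cache : List (Int × Int × Int × Int × Int)) (matrix : List (List Int)) (position : Int × Int) (size : Int) : Int :=
  if size = 1 then pvMget matrix position.1 position.2
  else
    let r := position.1
    let c := position.2
    let s := pvScanDown cache r c size.toNat size
    let base := if s = 1 then pvMget matrix r c else (pvLookup cache r c s).getD 0
    (PySem.List.pyRange (s + 1) (size + 1) 1).foldl
      (fun acc t => acc + pvMget matrix (r + t - 1) c) base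

-- ===== PRECONDITION & SPEC =====
-- Pre_: size ≥ 1 (Python A recurses forever for size ≤ 0 unless a cache hit intervenes) and every
-- row index r .. r+size-1 and column c the vertical line can touch is a valid Python index.
-- This is narrower than where A returns: a cache hit at the top key lets A return without touching
-- an out-of-range matrix or a nonpositive size; B returns the same cached value there (see cites).
def Pre_sum_vertical_line_py (cache : List (Int × Int × Int × Int × Int)) (matrix : List (List Int)) (position : Int × Int) (size : Int) : Prop :=
  1 ≤ size ∧
  (-(matrix.length : Int) ≤ position.1 ∧ position.1 + size ≤ (matrix.length : Int)) ∧
  ∀ t : Nat, t < size.toNat →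
    PySem.Raise.InRange ((PySem.List.pyGet? matrix (position.1 + t)).getD []).length position.2

instance (cache : List (Int × Int × Int × Int × Int)) (matrix : List (List Int)) (position : Int × Int) (size : Int) : Decidable (Pre_sum_vertical_line_py cache matrix position size) := by
  unfold Pre_sum_vertical_line_py; infer_instance

def pvWitness_sum_vertical_line_py : (List (Int × Int × Int × Int × Int)) × List (List Int) × (Int × Int) × Int :=
  ([(-2, 0, 0, 2, 9)], [[1, 2], [3, 4], [5, 6]], (0, 0), 3)

def Spec_sum_vertical_line_py (cache : List (Int × Int × Int × Int × Int)) (matrix : List (List Int)) (position : Int × Int) (size : Int) (out : Int) : Prop := out = sum_vertical_line_py_alt cache matrix position size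
instance (cache : List (Int × Int × Int × Int × Int)) (matrix : List (List Int)) (position : Int × Int) (size : Int) (out : Int) : Decidable (Spec_sum_vertical_line_py cache matrix position size out) := by unfold Spec_sum_vertical_line_py; infer_instance

-- ===== CLAIM (what is proved, stated in full; the proofs are below) =====
def Claim_equal_sum_vertical_line_py : Prop := ∀ (cache : List (Int × Int × Int × Int × Int)) (matrix : List (List Int)) (position : Int × Int) (size : Int), Dom_sum_vertical_line_py cache matrix position size → Pre_sum_vertical_line_py cache matrix position size → Spec_sum_vertical_line_py cache matrix position size (sum_vertical_line_py cache matrix position size)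

-- ===== LEMMAS AND PROOFS =====

-- the scan never increases s
lemma pvScanDown_le (cache : List (Int × Int × Int × Int × Int)) (r c : Int) :
    ∀ (fuel : Nat) (s : Int), pvScanDown cache r c fuel s ≤ s := by
  intro fuel
  induction fuel with
  | zero =>
    intro s
    unfold pvScanDown
    split <;> [skip; omega]
    cases pvLookup cache r c s <;> simp
  | succ n ih =>
    intro s
    unfold pvScanDown
    split <;> [skip; omega]
    cases pvLookup cache r c s with
    | none => simpa using le_trans (ih (s - 1)) (by omega)
    | some v => simp

-- core invariant: the fuelled recursion equals scan-then-accumulate, for any sufficient fuel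
lemma pvARec_eq_scan (cache : List (Int × Int × Int × Int × Int)) (matrix : List (List Int)) (r c : Int) :
    ∀ (fuel : Nat) (size : Int), 1 ≤ size → size.toNat ≤ fuel + 1 →
      pvARec cache matrix r c fuel size =
        (PySem.List.pyRange (pvScanDown cache r c fuel size + 1) (size + 1) 1).foldl
          (fun acc t => acc + pvMget matrix (r + t - 1) c)
          (if pvScanDown cache r c fuel size = 1 then pvMget matrix r c
           else (pvLookup cache r c (pvScanDown cache r c fuel size)).getD 0) := by
  intro fuel
  induction fuel with
  | zero =>
    intro size h1 h2
    have hsz : size = 1 := by omega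
    subst hsz
    unfold pvARec pvScanDown
    simp [PySem.List.pyRange_one_eq_nil]
  | succ n ih =>
    intro size h1 h2
    by_cases hsz : size = 1
    · subst hsz
      unfold pvARec pvScanDown
      simp [PySem.List.pyRange_one_eq_nil]
    · have h2lt : 1 < size := by omega
      unfold pvARec pvScanDown
      simp only [if_neg hsz, if_pos h2lt]
      cases hlk : pvLookup cache r c size with
      | some v =>
        simp [hlk, PySem.List.pyRange_one_eq_nil, (by omega : ¬ size = 1)]
      | none =>
        have hle : pvScanDown cache r c n (size - 1) ≤ size - 1 := pvScanDown_le cache r c n (size - 1)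
        have hrng : PySem.List.pyRange (pvScanDown cache r c n (size - 1) + 1) (size + 1) 1 =
            PySem.List.pyRange (pvScanDown cache r c n (size - 1) + 1) size 1 ++ [size] :=
          PySem.List.pyRange_one_succ_right (by omega)
        have key := ih (size - 1) (by omega) (by omega)
        show pvARec cache matrix r c n (size - 1) + pvMget matrix (r + size - 1) c =
          List.foldl (fun acc t => acc + pvMget matrix (r + t - 1) c)
            (if pvScanDown cache r c n (size - 1) = 1 then pvMget matrix r c
             else (pvLookup cache r c (pvScanDown cache r c n (size - 1))).getD 0)
            (PySem.List.pyRange (pvScanDown cache r c n (size - 1) + 1) (size + 1) 1)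
        rw [hrng, List.foldl_append, key]
        simp

-- ===== VERDICT (by name: the statement is the Claim_ definition above) =====
theorem sum_vertical_line_py_spec : Claim_equal_sum_vertical_line_py := by
  intro cache matrix position size _ hpre
  unfold Spec_sum_vertical_line_py sum_vertical_line_py sum_vertical_line_py_alt
  obtain ⟨h1, -, -⟩ := hpre
  by_cases hsz : size = 1
  · subst hsz
    unfold pvARec
    simp
  · simp only [if_neg hsz]
    exact pvARec_eq_scan cache matrix position.1 position.2 size.toNat size h1 (by omega)
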